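-- pv_equiv track=rewrite | github.com/ndgigliotti/nlpeep | src/rag_viewer/schema.py | _looks_like_docs
-- ===== SOURCE A (Python) =====
-- from typing import Any
--
-- def _looks_like_docs(items: list[dict[str, Any]]) -> bool:
--     """Check if list items look like retrieved documents."""
--     has_text = False
--     has_score = False
--     for item in items[:5]:
--         keys_lower = {k.lower() for k in item}
--         if keys_lower & {"text", "content", "passage", "chunk", "document", "page_content"}:
--             has_text = True
--         if keys_lower & {"score", "relevance", "similarity", "distance", "rank"}:
--             has_score = True
--     return has_text and has_score
-- ===== SOURCE B (Python) =====
-- _TEXT_KEYS = ("text", "content", "passage", "chunk", "document", "page_content")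
-- _SCORE_KEYS = ("score", "relevance", "similarity", "distance", "rank")
--
--
-- def _looks_like_docs(items):
--     """Check if list items look like retrieved documents."""
--
--     def scan(rest, budget, need_text, need_score):
--         if not need_text and not need_score:
--             return True
--         if budget == 0 or not rest:
--             return False
--         item, tail = rest[0], rest[1:]
--         lowered = [k.lower() for k in item]
--         if need_text and any(k in _TEXT_KEYS for k in lowered):
--             need_text = False
--         if need_score and any(k in _SCORE_KEYS for k in lowered):
--             need_score = False
--         return scan(tail, budget - 1, need_text, need_score)
--
--     return scan(items, 5, True, True)
-- ===== Notes on version B (the rewrite author's own statement) =====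
-- stated objective: alternative
-- what changed: Replaces the flag-accumulating loop over a slice with a recursive scan carrying a budget counter and two 'still needed' flags, which stops early as soon as both vocabularies are matched; no set objects are built, keys are tested by direct tuple membership.
import Mathlib
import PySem

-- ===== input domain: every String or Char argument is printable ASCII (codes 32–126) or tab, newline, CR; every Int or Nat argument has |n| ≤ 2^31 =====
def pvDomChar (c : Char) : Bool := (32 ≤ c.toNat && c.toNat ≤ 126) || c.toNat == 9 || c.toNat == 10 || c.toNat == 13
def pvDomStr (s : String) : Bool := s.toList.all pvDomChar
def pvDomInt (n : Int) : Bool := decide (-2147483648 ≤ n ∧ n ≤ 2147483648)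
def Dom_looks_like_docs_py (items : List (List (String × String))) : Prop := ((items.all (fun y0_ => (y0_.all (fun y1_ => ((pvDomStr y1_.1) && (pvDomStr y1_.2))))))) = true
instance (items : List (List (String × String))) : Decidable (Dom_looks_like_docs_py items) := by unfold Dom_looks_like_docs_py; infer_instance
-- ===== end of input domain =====

-- B replaces A's flag-accumulating loop over a slice with a recursive scan carrying a
-- budget counter and two "still needed" flags that stops early once both are satisfied
-- (objective: alternative decomposition, no set objects built).

-- ===== PORT A =====
def pvTextVocab : List String := ["text", "content", "passage", "chunk", "document", "page_content"]
def pvScoreVocab : List String := ["score", "relevance", "similarity", "distance", "rank"]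

def looks_like_docs_py (items : List (List (String × String))) : Bool :=
  let step := fun (s : Bool × Bool) (item : List (String × String)) =>
    let keysLower : PySem.Set String := PySem.Set.ofList (item.map (fun kv => PySem.Str.lower kv.1))
    let hasText := if (PySem.Set.inter keysLower (PySem.Set.ofList pvTextVocab)).isEmpty = false then true else s.1
    let hasScore := if (PySem.Set.inter keysLower (PySem.Set.ofList pvScoreVocab)).isEmpty = false then true else s.2
    (hasText, hasScore)
  let s := (PySem.List.slice items none (some 5)).foldl step (false, false)
  s.1 && s.2

-- ===== PORT B =====
-- transliteration of Source B's recursive `scan` (structural recursion on the list)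
def pvAltScan (rest : List (List (String × String))) (budget : Nat)
    (needText needScore : Bool) : Bool :=
  if !needText && !needScore then true
  else if budget == 0 then false
  else
    match rest with
    | [] => false
    | item :: tail =>
      let lowered := item.map (fun kv => PySem.Str.lower kv.1)
      let needText' := if needText && lowered.any (fun k => decide (k ∈ pvTextVocab)) then false else needText
      let needScore' := if needScore && lowered.any (fun k => decide (k ∈ pvScoreVocab)) then false else needScore
      pvAltScan tail (budget - 1) needText' needScore'

def looks_like_docs_py_alt (items : List (List (String × String))) : Bool :=
  pvAltScan items 5 true true

-- ===== PRECONDITION & SPEC =====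
def Spec_looks_like_docs_py (items : List (List (String × String))) (out : Bool) : Prop := out = looks_like_docs_py_alt items
instance (items : List (List (String × String))) (out : Bool) : Decidable (Spec_looks_like_docs_py items out) := by unfold Spec_looks_like_docs_py; infer_instance

-- ===== CLAIM =====
def Claim_equal_looks_like_docs_py : Prop := ∀ (items : List (List (String × String))), Dom_looks_like_docs_py items → Spec_looks_like_docs_py items (looks_like_docs_py items)

-- ===== LEMMAS AND PROOFS =====

-- "the set intersection of set(l) with set(t) is nonempty" ↔ "some element of l is in t"
theorem pv_inter_nonempty (l t : List String) :
    (!(PySem.Set.inter (PySem.Set.ofList l) (PySem.Set.ofList t)).isEmpty)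
      = l.any (fun x => decide (x ∈ t)) := by
  have hmem : ∀ x : String,
      x ∈ PySem.Set.inter (PySem.Set.ofList l) (PySem.Set.ofList t) ↔ x ∈ l ∧ x ∈ t := by
    intro x
    simp [PySem.Set.inter, List.mem_filter, PySem.Set.contains, PySem.Set.mem_ofList]
  cases hE : (PySem.Set.inter (PySem.Set.ofList l) (PySem.Set.ofList t)).isEmpty with
  | true =>
    have hnil : PySem.Set.inter (PySem.Set.ofList l) (PySem.Set.ofList t) = [] :=
      List.isEmpty_iff.mp hE
    have hany : l.any (fun x => decide (x ∈ t)) = false := by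
      rw [List.any_eq_false]
      intro x hx
      simp only [decide_eq_true_eq]
      intro hxt
      have hm := (hmem x).mpr ⟨hx, hxt⟩
      rw [hnil] at hm
      simp at hm
    simp [hany]
  | false =>
    have hne : PySem.Set.inter (PySem.Set.ofList l) (PySem.Set.ofList t) ≠ [] := by
      intro e; rw [e] at hE; simp at hE
    obtain ⟨x, hx⟩ := List.exists_mem_of_ne_nil _ hne
    obtain ⟨hxl, hxt⟩ := (hmem x).mp hx
    have hany : l.any (fun x => decide (x ∈ t)) = true :=
      List.any_eq_true.mpr ⟨x, hxl, by simp [hxt]⟩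
    simp [hany]

def pvHit (t : List String) (item : List (String × String)) : Bool :=
  (item.map (fun kv => PySem.Str.lower kv.1)).any (fun x => decide (x ∈ t))

theorem pv_foldA (L : List (List (String × String))) (s : Bool × Bool) :
    L.foldl (fun (s : Bool × Bool) (item : List (String × String)) =>
        ((if (PySem.Set.inter (PySem.Set.ofList (item.map (fun kv => PySem.Str.lower kv.1))) (PySem.Set.ofList pvTextVocab)).isEmpty = false then true else s.1),
         (if (PySem.Set.inter (PySem.Set.ofList (item.map (fun kv => PySem.Str.lower kv.1))) (PySem.Set.ofList pvScoreVocab)).isEmpty = false then true else s.2))) s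
      = (s.1 || L.any (pvHit pvTextVocab), s.2 || L.any (pvHit pvScoreVocab)) := by
  induction L generalizing s with
  | nil => simp
  | cons hd tl ih =>
    rw [List.foldl_cons, ih]
    have h1 := pv_inter_nonempty (hd.map (fun kv => PySem.Str.lower kv.1)) pvTextVocab
    have h2 := pv_inter_nonempty (hd.map (fun kv => PySem.Str.lower kv.1)) pvScoreVocab
    rw [Prod.mk.injEq]
    constructor
    · rcases hh : (hd.map (fun kv => PySem.Str.lower kv.1)).any (fun x => decide (x ∈ pvTextVocab)) with _ | _
      · have hI : (PySem.Set.inter (PySem.Set.ofList (hd.map (fun kv => PySem.Str.lower kv.1))) (PySem.Set.ofList pvTextVocab)).isEmpty = true := by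
          rw [hh] at h1; simpa using h1
        simp [hI, List.any_cons, pvHit, hh]
      · have hI : (PySem.Set.inter (PySem.Set.ofList (hd.map (fun kv => PySem.Str.lower kv.1))) (PySem.Set.ofList pvTextVocab)).isEmpty = false := by
          rw [hh] at h1; simpa using h1
        simp [hI, List.any_cons, pvHit, hh]
    · rcases hh : (hd.map (fun kv => PySem.Str.lower kv.1)).any (fun x => decide (x ∈ pvScoreVocab)) with _ | _
      · have hI : (PySem.Set.inter (PySem.Set.ofList (hd.map (fun kv => PySem.Str.lower kv.1))) (PySem.Set.ofList pvScoreVocab)).isEmpty = true := by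
          rw [hh] at h2; simpa using h2
        simp [hI, List.any_cons, pvHit, hh]
      · have hI : (PySem.Set.inter (PySem.Set.ofList (hd.map (fun kv => PySem.Str.lower kv.1))) (PySem.Set.ofList pvScoreVocab)).isEmpty = false := by
          rw [hh] at h2; simpa using h2
        simp [hI, List.any_cons, pvHit, hh]

-- characterisation of B's early-exit scan:
-- it returns "each still-needed vocabulary is hit somewhere in the first `budget` items"
theorem pv_scan_char (L : List (List (String × String))) (b : Nat) (nT nS : Bool) :
    pvAltScan L b nT nS
      = ((!nT || (L.take b).any (pvHit pvTextVocab)) &&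
         (!nS || (L.take b).any (pvHit pvScoreVocab))) := by
  induction L generalizing b nT nS with
  | nil =>
    rw [pvAltScan]
    cases nT <;> cases nS <;> cases b <;> simp
  | cons hd tl ih =>
    rw [pvAltScan]
    cases b with
    | zero => cases nT <;> cases nS <;> simp
    | succ b' =>
      have eT : (hd.map (fun kv => PySem.Str.lower kv.1)).any (fun k => decide (k ∈ pvTextVocab)) = pvHit pvTextVocab hd := rfl
      have eS : (hd.map (fun kv => PySem.Str.lower kv.1)).any (fun k => decide (k ∈ pvScoreVocab)) = pvHit pvScoreVocab hd := rfl
      simp only [eT, eS, Nat.succ_sub_one, List.take_succ_cons, List.any_cons]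
      rcases h1 : pvHit pvTextVocab hd with _ | _ <;>
        rcases h2 : pvHit pvScoreVocab hd with _ | _ <;>
        cases nT <;> cases nS <;> simp [ih]

-- ===== VERDICT =====
theorem looks_like_docs_py_spec : Claim_equal_looks_like_docs_py := by
  intro items _
  simp only [Spec_looks_like_docs_py, looks_like_docs_py, looks_like_docs_py_alt]
  rw [pv_foldA]
  have : PySem.List.slice items none (some 5) = items.take 5 :=
    PySem.List.slice_to_natCast items 5
  rw [this, pv_scan_char]
  simp
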